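-- pv_equiv track=rewrite | github.com/Jus-tinZhu/MidtermReport | PromotorsFind.py | reads_by_direction
-- ===== SOURCE A (Python) =====
-- def combine_reads_coords(reads):
--     '''
--     [0] = start
--     [1] = end
--     [2] = is reverse
--     '''
--     direction = reads[0][2]
--     maxi = reads[0][1]
--     mini = reads[0][0]
--
--     for i in range(len(reads)):
--         if reads[i][0] < mini:
--             mini = reads[i][0]
--         if reads[i][1] > maxi:
--             maxi = reads[i][1]
--         if reads[i][2] != direction:
--             assert "something wrong with reads direction"
--
--     return (mini, maxi, direction)
--
-- def reads_by_direction(alignment):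
--     direction = alignment[0][2]
--     by_direction = []
--     temp = []
--
--     for i in range(len(alignment)): #group by direction
--         if alignment[i][2] != direction:
--             by_direction.append(temp)
--             temp = []
--             direction = alignment[i][2]
--
--         temp.append(alignment[i])
--         if i == len(alignment)-1:
--             by_direction.append(temp)
--
--     coords_dir = []
--     for i in range(len(by_direction)):
--         coords = combine_reads_coords(by_direction[i]) #get boundary coords
--         coords_dir.append(coords)
--
--     return coords_dir
-- ===== SOURCE B (Python) =====
-- def reads_by_direction(alignment):
--     # single pass: fold each read into running (mini, maxi, direction), emitting
--     # a boundary tuple whenever the direction flips; no intermediate groups.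
--     mini, maxi, direction = alignment[0]
--     res = []
--     for start, end, d in alignment[1:]:
--         if d != direction:
--             res.append((mini, maxi, direction))
--             mini, maxi, direction = start, end, d
--         else:
--             mini = min(mini, start)
--             maxi = max(maxi, end)
--     res.append((mini, maxi, direction))
--     return res
-- ===== Notes on version B (the rewrite author's own statement) =====
-- stated objective: simpler
-- what changed: B replaces A's two-phase design (build a list of direction-runs, then scan each run again for min/max) by one fused pass that keeps running mini/maxi/direction and emits a tuple on each direction flip, never materialising the groups.
import Mathlib
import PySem

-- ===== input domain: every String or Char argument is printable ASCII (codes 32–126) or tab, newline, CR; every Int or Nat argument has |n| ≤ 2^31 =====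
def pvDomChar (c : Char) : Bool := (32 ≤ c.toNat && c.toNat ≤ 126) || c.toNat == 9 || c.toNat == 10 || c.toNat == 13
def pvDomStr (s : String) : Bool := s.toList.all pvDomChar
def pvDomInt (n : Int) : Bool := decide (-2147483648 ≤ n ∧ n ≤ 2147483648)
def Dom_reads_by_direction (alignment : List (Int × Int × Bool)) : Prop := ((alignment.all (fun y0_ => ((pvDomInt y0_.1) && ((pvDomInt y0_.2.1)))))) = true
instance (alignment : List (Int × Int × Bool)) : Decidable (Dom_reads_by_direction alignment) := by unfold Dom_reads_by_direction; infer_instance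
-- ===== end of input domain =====

-- B fuses A's two phases (group by direction, then rescan each group) into one pass
-- with running mini/maxi/direction; same return value on every nonempty alignment (simpler, not faster).

-- ===== PORT A =====
-- combine_reads_coords: seed from reads[0], then scan all reads updating mini/maxi.
-- (the Python `assert "..."` is a no-op: a nonempty string is truthy)
-- [] is unreachable under Pre_ (Python raises IndexError on reads[0]).
def pvCombineStep (st : Int × Int × Bool) (x : Int × Int × Bool) : Int × Int × Bool :=
  let mini := if x.1 < st.1 then x.1 else st.1
  let maxi := if x.2.1 > st.2.1 then x.2.1 else st.2.1
  (mini, maxi, st.2.2)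

def pvCombine (reads : List (Int × Int × Bool)) : Int × Int × Bool :=
  match reads with
  | [] => (0, 0, false)
  | r0 :: _ => reads.foldl pvCombineStep (r0.1, r0.2.1, r0.2.2)

-- the grouping loop of A: per element, maybe close the current run `temp`,
-- append the element to `temp`, and on the LAST iteration (rest = []) push `temp`.
def pvLoopA : List (Int × Int × Bool) → Bool → List (List (Int × Int × Bool)) →
    List (Int × Int × Bool) → List (List (Int × Int × Bool))
  | [], _, byd, _ => byd
  | x :: rest, dir, byd, temp =>
    let p := if x.2.2 ≠ dir then (x.2.2, byd ++ [temp], ([] : List (Int × Int × Bool)))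
             else (dir, byd, temp)
    let temp' := p.2.2 ++ [x]
    let byd' := if rest = [] then p.2.1 ++ [temp'] else p.2.1
    pvLoopA rest p.1 byd' temp'

def reads_by_direction (alignment : List (Int × Int × Bool)) : List (Int × Int × Bool) :=
  match alignment with
  | [] => []   -- unreachable under Pre_ (Python raises IndexError)
  | a0 :: _ =>
    let byd := pvLoopA alignment a0.2.2 [] []
    byd.map pvCombine

-- ===== PORT B =====
-- single pass: running (mini, maxi, direction); emit on every direction flip, then once at the end.
def pvLoopB : List (Int × Int × Bool) → Int → Int → Bool →
    List (Int × Int × Bool) → List (Int × Int × Bool)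
  | [], mini, maxi, dir, res => res ++ [(mini, maxi, dir)]
  | (s, e, d) :: rest, mini, maxi, dir, res =>
    if d ≠ dir then pvLoopB rest s e d (res ++ [(mini, maxi, dir)])
    else pvLoopB rest (min mini s) (max maxi e) dir res

def reads_by_direction_alt (alignment : List (Int × Int × Bool)) : List (Int × Int × Bool) :=
  match alignment with
  | [] => []   -- unreachable under Pre_ (Python raises IndexError)
  | (s, e, d) :: rest => pvLoopB rest s e d []

-- ===== PRECONDITION & SPEC =====
-- Pre_ excludes exactly the empty list, on which Python A raises IndexError.
def Pre_reads_by_direction (alignment : List (Int × Int × Bool)) : Prop := alignment ≠ []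
instance (alignment : List (Int × Int × Bool)) : Decidable (Pre_reads_by_direction alignment) := by
  unfold Pre_reads_by_direction; infer_instance

def pvWitness_reads_by_direction : (List (Int × Int × Bool)) := [(1, 5, true), (2, 9, true), (3, 4, false)]

def Spec_reads_by_direction (alignment : List (Int × Int × Bool)) (out : List (Int × Int × Bool)) : Prop := out = reads_by_direction_alt alignment
instance (alignment : List (Int × Int × Bool)) (out : List (Int × Int × Bool)) : Decidable (Spec_reads_by_direction alignment out) := by unfold Spec_reads_by_direction; infer_instance

-- ===== CLAIM (what is proved, stated in full; the proofs are below) =====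
def Claim_equal_reads_by_direction : Prop := ∀ (alignment : List (Int × Int × Bool)), Dom_reads_by_direction alignment → Pre_reads_by_direction alignment → Spec_reads_by_direction alignment (reads_by_direction alignment)

-- ===== LEMMAS AND PROOFS =====

-- appending one element to a nonempty run updates the combined coords by one step
lemma pvCombine_append (temp : List (Int × Int × Bool)) (x : Int × Int × Bool)
    (h : temp ≠ []) : pvCombine (temp ++ [x]) = pvCombineStep (pvCombine temp) x := by
  cases temp with
  | nil => exact absurd rfl h
  | cons r0 t =>
    simp [pvCombine, List.foldl_append]

lemma pvCombine_single (x : Int × Int × Bool) :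
    pvCombine [x] = (x.1, x.2.1, x.2.2) := by
  simp [pvCombine, pvCombineStep]

-- one-step equations for pvLoopA (avoid simp over-unfolding the recursion)
lemma pvLoopA_cons_eq (x : Int × Int × Bool) (rest : List (Int × Int × Bool)) (dir : Bool)
    (byd : List (List (Int × Int × Bool))) (temp : List (Int × Int × Bool))
    (h : x.2.2 = dir) :
    pvLoopA (x :: rest) dir byd temp =
      pvLoopA rest dir (if rest = [] then byd ++ [temp ++ [x]] else byd) (temp ++ [x]) := by
  simp [pvLoopA, h]

lemma pvLoopA_cons_ne (x : Int × Int × Bool) (rest : List (Int × Int × Bool)) (dir : Bool)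
    (byd : List (List (Int × Int × Bool))) (temp : List (Int × Int × Bool))
    (h : x.2.2 ≠ dir) :
    pvLoopA (x :: rest) dir byd temp =
      pvLoopA rest x.2.2 (if rest = [] then (byd ++ [temp]) ++ [[x]] else byd ++ [temp]) [x] := by
  simp [pvLoopA, h]

-- main invariant: mapping pvCombine over A's grouping loop equals B's fused loop,
-- provided the current run `temp` is nonempty and (mini, maxi, dir) summarises it.
lemma pvLoop_eq : ∀ (rest : List (Int × Int × Bool)) (byd : List (List (Int × Int × Bool)))
    (temp : List (Int × Int × Bool)) (mini maxi : Int) (dir : Bool),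
    temp ≠ [] → pvCombine temp = (mini, maxi, dir) →
    (pvLoopA rest dir byd temp).map pvCombine =
      (if rest = [] then byd.map pvCombine else pvLoopB rest mini maxi dir (byd.map pvCombine)) := by
  intro rest
  induction rest with
  | nil =>
    intro byd temp mini maxi dir _ _
    simp [pvLoopA]
  | cons x rest ih =>
    intro byd temp mini maxi dir htemp hsum
    obtain ⟨s, e, d⟩ := x
    by_cases hd : d = dir
    · -- same direction: extend the run
      subst hd
      have hstep : pvCombine (temp ++ [(s, e, d)]) = (min mini s, max maxi e, d) := by
        rw [pvCombine_append temp _ htemp, hsum]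
        simp only [pvCombineStep]
        rw [show (if s < mini then s else mini) = min mini s from by split_ifs <;> omega,
            show (if e > maxi then e else maxi) = max maxi e from by split_ifs <;> omega]
      rw [pvLoopA_cons_eq _ _ _ _ _ rfl]
      cases rest with
      | nil =>
        simp [pvLoopA, pvLoopB, hstep]
      | cons y ys =>
        rw [if_neg (by simp : ¬(y :: ys = []))]
        rw [ih byd (temp ++ [(s, e, d)]) (min mini s) (max maxi e) d (by simp) hstep]
        simp [pvLoopB]
    · -- direction flip: close the run, start a new one with this read
      rw [pvLoopA_cons_ne _ _ _ _ _ hd]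
      cases rest with
      | nil =>
        simp [pvLoopA, pvLoopB, hd, hsum, pvCombine_single]
      | cons y ys =>
        rw [if_neg (by simp : ¬(y :: ys = []))]
        rw [ih (byd ++ [temp]) [(s, e, d)] s e d (by simp) (pvCombine_single _)]
        simp [pvLoopB, hd, hsum]

-- ===== VERDICT (by name: the statement is the Claim_ definition above) =====
theorem reads_by_direction_spec : Claim_equal_reads_by_direction := by
  intro alignment _ hpre
  unfold Spec_reads_by_direction
  cases alignment with
  | nil => exact absurd rfl hpre
  | cons a0 rest =>
    obtain ⟨s, e, d⟩ := a0
    show (pvLoopA ((s, e, d) :: rest) d [] []).map pvCombine = pvLoopB rest s e d []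
    rw [pvLoopA_cons_eq _ _ _ _ _ rfl]
    cases rest with
    | nil =>
      simp [pvLoopA, pvLoopB, pvCombine_single]
    | cons y ys =>
      rw [if_neg (by simp : ¬(y :: ys = []))]
      have h := pvLoop_eq (y :: ys) [] [(s, e, d)] s e d (by simp) (pvCombine_single _)
      simpa using h
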